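-- pv_equiv track=rewrite | github.com/Mikecraft1224/EiP-WiSe2023-Exercises | Zwischenklausur/ex04.py | summiertes3DFeld
-- ===== SOURCE A (Python) =====
-- def erzeuge3DFeld(n):
--     return [[[i+j+k for k in range(n)] for j in range(n)] for i in range(n)]
--
-- def summiertes3DFeld(n):
--     field = erzeuge3DFeld(n)
--     summed = 0
--     for i in range(n):
--         for j in range(n):
--             for k in range(n):
--                 summed += field[i][j][k]
--     return summed
-- ===== SOURCE B (Python) =====
-- def summiertes3DFeld(n):
--     # Closed form: sum over i,j,k in range(n) of (i+j+k) = 3 * n^2 * (0+1+...+(n-1))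
--     if n <= 0:
--         return 0
--     return 3 * n * n * n * (n - 1) // 2
-- ===== Notes on version B (the rewrite author's own statement) =====
-- stated objective: faster
-- what changed: Replaces building the n*n*n field and summing it with three nested loops by the closed form 3*n^3*(n-1)/2 (0 for n<=0).
import Mathlib
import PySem

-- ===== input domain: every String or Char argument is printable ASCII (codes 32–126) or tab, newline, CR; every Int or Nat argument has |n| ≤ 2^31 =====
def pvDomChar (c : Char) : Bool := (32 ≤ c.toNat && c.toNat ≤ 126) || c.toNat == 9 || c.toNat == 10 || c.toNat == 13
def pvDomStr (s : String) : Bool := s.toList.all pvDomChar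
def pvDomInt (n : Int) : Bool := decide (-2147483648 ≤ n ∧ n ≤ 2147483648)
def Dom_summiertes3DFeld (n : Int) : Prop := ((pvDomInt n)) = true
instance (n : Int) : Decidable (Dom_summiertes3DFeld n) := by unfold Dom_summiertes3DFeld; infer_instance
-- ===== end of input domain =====

-- B replaces the O(n^3) field construction + triple summation loop by the O(1) closed form 3*n^3*(n-1)/2.


-- ===== PORT A =====
def erzeuge3DFeld (n : Int) : List (List (List Int)) :=
  (PySem.List.pyRange 0 n 1).map (fun i =>
    (PySem.List.pyRange 0 n 1).map (fun j =>
      (PySem.List.pyRange 0 n 1).map (fun k => i + j + k)))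

-- indexing field[i][j][k]: i,j,k come from range(n) so they are always in range; pyGetD's
-- default is never reached (Python never raises here)
def summiertes3DFeld (n : Int) : Int :=
  let field := erzeuge3DFeld n
  (PySem.List.pyRange 0 n 1).foldl (fun s i =>
    (PySem.List.pyRange 0 n 1).foldl (fun s j =>
      (PySem.List.pyRange 0 n 1).foldl (fun s k =>
        s + PySem.List.pyGetD (PySem.List.pyGetD (PySem.List.pyGetD field i []) j []) k 0) s) s) 0

-- ===== PORT B =====
def summiertes3DFeld_alt (n : Int) : Int :=
  if n ≤ 0 then 0 else PySem.Int.floordiv (3 * n * n * n * (n - 1)) 2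

-- ===== PRECONDITION & SPEC =====
def Spec_summiertes3DFeld (n : Int) (out : Int) : Prop := out = summiertes3DFeld_alt n
instance (n : Int) (out : Int) : Decidable (Spec_summiertes3DFeld n out) := by unfold Spec_summiertes3DFeld; infer_instance

-- ===== CLAIM (what is proved, stated in full; the proofs are below) =====
def Claim_equal_summiertes3DFeld : Prop := ∀ (n : Int), Dom_summiertes3DFeld n → Spec_summiertes3DFeld n (summiertes3DFeld n)

-- ===== LEMMAS AND PROOFS =====

-- sum of map of a scalar multiple (specific combination of the loop bodies here)
lemma sum_map_mul_left_int (l : List Int) (c : Int) :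
    (l.map (fun x => c * x)).sum = c * l.sum := by
  induction l with
  | nil => simp
  | cons a t ih => simp [ih]; ring

-- twice the sum of range(n)
lemma sum_pyRange_two (n : Int) (h : 0 ≤ n) :
    (PySem.List.pyRange 0 n 1).sum * 2 = n * (n - 1) := by
  induction n, h using Int.le_induction with
  | base => simp [PySem.List.pyRange_one_eq_nil]
  | succ m hm ih =>
    rw [PySem.List.pyRange_one_succ_right hm]
    simp only [List.sum_append, List.sum_cons, List.sum_nil, add_zero]
    linear_combination ih

-- the triple loop over the field equals the direct triple sum of i+j+k
lemma loops_eq (n : Int) :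
    summiertes3DFeld n =
      ((PySem.List.pyRange 0 n 1).map (fun i =>
        ((PySem.List.pyRange 0 n 1).map (fun j =>
          ((PySem.List.pyRange 0 n 1).map (fun k => i + j + k)).sum)).sum)).sum := by
  unfold summiertes3DFeld erzeuge3DFeld
  rw [PySem.List.foldl_congr_mem' (g := fun s i =>
    (PySem.List.pyRange 0 n 1).foldl (fun s j =>
      (PySem.List.pyRange 0 n 1).foldl (fun s k => s + (i + j + k)) s) s)]
  · rw [PySem.List.foldl_congr_mem' (g := fun s i =>
      s + ((PySem.List.pyRange 0 n 1).map (fun j =>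
        ((PySem.List.pyRange 0 n 1).map (fun k => i + j + k)).sum)).sum)]
    · rw [PySem.List.foldl_add]; simp
    · intro i _ acc
      rw [PySem.List.foldl_congr_mem' (g := fun s j =>
        s + ((PySem.List.pyRange 0 n 1).map (fun k => i + j + k)).sum)]
      · exact PySem.List.foldl_add _ _ _
      · intro j _ acc
        exact PySem.List.foldl_add _ _ _
  · intro i hi acc
    rw [PySem.List.mem_pyRange_one] at hi
    rw [PySem.List.pyGetD_map_pyRange_of_nonneg _ _ _ _ hi.1 hi.2]
    apply PySem.List.foldl_congr_mem'
    intro j hj acc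
    rw [PySem.List.mem_pyRange_one] at hj
    rw [PySem.List.pyGetD_map_pyRange_of_nonneg _ _ _ _ hj.1 hj.2]
    apply PySem.List.foldl_congr_mem'
    intro k hk acc
    rw [PySem.List.mem_pyRange_one] at hk
    rw [PySem.List.pyGetD_map_pyRange_of_nonneg _ _ _ _ hk.1 hk.2]

-- ===== VERDICT (by name: the statement is the Claim_ definition above) =====
theorem summiertes3DFeld_spec : Claim_equal_summiertes3DFeld := by
  intro n _
  unfold Spec_summiertes3DFeld summiertes3DFeld_alt
  rw [loops_eq]
  by_cases hn : n ≤ 0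
  · simp [hn, PySem.List.pyRange_one_eq_nil (by omega : n ≤ 0)]
  · simp only [if_neg hn]
    set R := PySem.List.pyRange 0 n 1 with hR
    have hlen : (R.length : Int) = n := by
      rw [hR, PySem.List.length_pyRange_one]; omega
    have hsum : R.sum * 2 = n * (n - 1) := sum_pyRange_two n (by omega)
    have hk : ∀ i j : Int, ((R.map (fun k => i + j + k)).sum) = n * (i + j) + R.sum := by
      intro i j
      rw [show (fun k : Int => i + j + k) = (fun k : Int => (fun _ => i + j) k + (fun k : Int => k) k) from rfl,
        PySem.List.sum_map_add_int, PySem.List.sum_map_const_int]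
      simp [hlen]
    have hj : ∀ i : Int, ((R.map (fun j =>
        ((R.map (fun k => i + j + k)).sum))).sum) = n * n * i + 2 * n * R.sum := by
      intro i
      rw [show (fun j => ((R.map (fun k => i + j + k)).sum)) =
          (fun j : Int => (fun _ => n * i + R.sum) j + (fun j : Int => n * j) j) by
            funext j; rw [hk]; simp; ring,
        PySem.List.sum_map_add_int, PySem.List.sum_map_const_int, sum_map_mul_left_int]
      simp [hlen]; ring
    rw [show (fun i => ((R.map (fun j =>
        ((R.map (fun k => i + j + k)).sum))).sum)) =
        (fun i : Int => (fun _ => 2 * n * R.sum) i + (fun i : Int => (n * n) * i) i) by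
          funext i; rw [hj]; simp; ring,
      PySem.List.sum_map_add_int, PySem.List.sum_map_const_int, sum_map_mul_left_int]
    have h2 : 3 * n * n * n * (n - 1) = (2 * n * R.sum * (R.length : Int) + n * n * R.sum) * 2 := by
      rw [hlen]; linear_combination (-3 * n * n) * hsum
    rw [h2, PySem.Int.floordiv_eq_ediv_of_pos (by omega), Int.mul_ediv_cancel _ (by omega)]
    ring
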